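-- pv_equiv track=rewrite | github.com/RobinRodenhausen/adventofcode2023 | 22/day22.py | settle
-- ===== SOURCE A (Python) =====
-- from collections import defaultdict
--
-- def drop_brick(
--     brick: tuple[int, int, int, int, int, int], max_z: defaultdict[tuple[int, int], int]
-- ) -> tuple[int, int, int, int, int, int]:
--     x1, y1, z1, x2, y2, z2 = brick
--     settle_z = max(max_z[(x, y)] for x in range(x1, x2 + 1) for y in range(y1, y2 + 1)) + 1  # +1 fall on top and not same place
--     fall_distance = z1 - settle_z
--     return (x1, y1, z1 - fall_distance, x2, y2, z2 - fall_distance)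
--
-- def settle(bricks: list[tuple[int, int, int, int, int, int]]) -> tuple[list[tuple[int, int, int, int, int, int]], int]:
--     max_z: defaultdict[tuple[int, int], int] = defaultdict(int)
--     settled_bricks: list[tuple[int, int, int, int, int, int]] = []
--     falls = 0
--     for brick in bricks:
--         dropped_brick = drop_brick(brick, max_z)
--         if dropped_brick[2] != brick[2]:
--             falls += 1
--         settled_bricks.append(dropped_brick)
--         x1, y1, _, x2, y2, z2 = dropped_brick
--         for x in range(x1, x2 + 1):
--             for y in range(y1, y2 + 1):
--                 max_z[(x, y)] = z2
--     return settled_bricks, falls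
-- ===== SOURCE B (Python) =====
-- def _cover_height(settled, x, y):
--     # top z of the most recently settled brick covering cell (x, y), else 0
--     for bx1, by1, _, bx2, by2, bz2 in reversed(settled):
--         if bx1 <= x <= bx2 and by1 <= y <= by2:
--             return bz2
--     return 0
--
-- def settle(bricks):
--     settled = []
--     falls = 0
--     for x1, y1, z1, x2, y2, z2 in bricks:
--         support = max(
--             _cover_height(settled, x, y)
--             for x in range(x1, x2 + 1)
--             for y in range(y1, y2 + 1)
--         )
--         drop = z1 - (support + 1)
--         if drop != 0:
--             falls += 1
--         settled.append((x1, y1, z1 - drop, x2, y2, z2 - drop))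
--     return settled, falls
-- ===== Notes on version B (the rewrite author's own statement) =====
-- stated objective: alternative
-- what changed: Drops the per-cell defaultdict heightmap entirely: B computes each brick's support height by scanning the already-settled bricks in reverse for the most recent brick covering each footprint cell, maintaining only the settled list.
import Mathlib
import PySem

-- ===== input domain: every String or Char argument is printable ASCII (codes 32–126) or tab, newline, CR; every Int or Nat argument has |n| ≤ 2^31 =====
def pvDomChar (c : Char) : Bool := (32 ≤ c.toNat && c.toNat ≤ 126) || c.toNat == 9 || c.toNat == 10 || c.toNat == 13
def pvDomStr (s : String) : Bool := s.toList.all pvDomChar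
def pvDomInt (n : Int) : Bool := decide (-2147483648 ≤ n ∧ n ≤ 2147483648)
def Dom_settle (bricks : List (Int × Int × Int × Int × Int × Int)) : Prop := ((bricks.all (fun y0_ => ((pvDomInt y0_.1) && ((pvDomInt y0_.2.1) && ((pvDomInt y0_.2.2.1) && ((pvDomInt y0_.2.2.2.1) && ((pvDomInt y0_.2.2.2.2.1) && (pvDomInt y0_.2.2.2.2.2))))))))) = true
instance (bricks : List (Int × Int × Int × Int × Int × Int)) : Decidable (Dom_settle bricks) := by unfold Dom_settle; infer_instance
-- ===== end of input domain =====

-- B replaces A's per-cell heightmap with a reverse scan of the settled list; objective: alternative (same results, different state).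

-- ===== PORT A =====
-- the footprint cells "for x in range(x1, x2+1) for y in range(y1, y2+1)" (shared by both Pythons' generators)
def pvCells (x1 x2 y1 y2 : Int) : List (Int × Int) :=
  (PySem.List.pyRange x1 (x2 + 1) 1).flatMap (fun x =>
    (PySem.List.pyRange y1 (y2 + 1) 1).map (fun y => (x, y)))

-- drop_brick; max(...) over an empty generator raises ValueError: that case (max? = none) is excluded by Pre_settle,
-- the .getD 0 is never reached inside Pre_settle.  A's defaultdict(int) is used only point-wise (never iterated),
-- so it is ported as Std.HashMap with lookup default 0 — exact for every read and write A performs.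
def drop_brick (brick : Int × Int × Int × Int × Int × Int)
    (max_z : Std.HashMap (Int × Int) Int) : Int × Int × Int × Int × Int × Int :=
  match brick with
  | (x1, y1, z1, x2, y2, z2) =>
    let settle_z : Int :=
      ((PySem.List.max? ((pvCells x1 x2 y1 y2).map (fun c => max_z.getD c 0)) (fun v => v)).getD 0) + 1
    let fall_distance := z1 - settle_z
    (x1, y1, z1 - fall_distance, x2, y2, z2 - fall_distance)

-- the main for-loop of A, state (max_z, settled_bricks, falls)
def settleLoop (max_z : Std.HashMap (Int × Int) Int)
    (settled : List (Int × Int × Int × Int × Int × Int)) (falls : Int) :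
    List (Int × Int × Int × Int × Int × Int) → (List (Int × Int × Int × Int × Int × Int)) × Int
  | [] => (settled, falls)
  | brick :: rest =>
    let db := drop_brick brick max_z
    let falls' := if db.2.2.1 ≠ brick.2.2.1 then falls + 1 else falls
    let max_z' := (pvCells db.1 db.2.2.2.1 db.2.1 db.2.2.2.2.1).foldl
      (fun d c => d.insert c db.2.2.2.2.2) max_z
    settleLoop max_z' (settled ++ [db]) falls' rest

def settle (bricks : List (Int × Int × Int × Int × Int × Int)) : (List (Int × Int × Int × Int × Int × Int)) × Int :=
  settleLoop Std.HashMap.emptyWithCapacity [] 0 bricks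

-- ===== PORT B =====
-- _cover_height's "for ... in reversed(settled)" loop, on the reversed list
def coverHeightRev (x y : Int) : List (Int × Int × Int × Int × Int × Int) → Int
  | [] => 0
  | (bx1, by1, _, bx2, by2, bz2) :: rest =>
    if bx1 ≤ x ∧ x ≤ bx2 ∧ by1 ≤ y ∧ y ≤ by2 then bz2 else coverHeightRev x y rest

def cover_height (settled : List (Int × Int × Int × Int × Int × Int)) (x y : Int) : Int :=
  coverHeightRev x y settled.reverse

-- the main for-loop of B, state (settled, falls); max over empty generator raises in B too (outside Pre_settle)
def settleAltLoop (settled : List (Int × Int × Int × Int × Int × Int)) (falls : Int) :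
    List (Int × Int × Int × Int × Int × Int) → (List (Int × Int × Int × Int × Int × Int)) × Int
  | [] => (settled, falls)
  | (x1, y1, z1, x2, y2, z2) :: rest =>
    let support : Int :=
      (PySem.List.max? ((pvCells x1 x2 y1 y2).map (fun c => cover_height settled c.1 c.2)) (fun v => v)).getD 0
    let drop := z1 - (support + 1)
    let falls' := if drop ≠ 0 then falls + 1 else falls
    settleAltLoop (settled ++ [(x1, y1, z1 - drop, x2, y2, z2 - drop)]) falls' rest

def settle_alt (bricks : List (Int × Int × Int × Int × Int × Int)) : (List (Int × Int × Int × Int × Int × Int)) × Int :=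
  settleAltLoop [] 0 bricks

-- ===== PRECONDITION & SPEC =====
-- Pre_ excludes bricks with an empty footprint (x1 > x2 or y1 > y2): there Python A's max() over an
-- empty generator raises ValueError (and B's does too).
def Pre_settle (bricks : List (Int × Int × Int × Int × Int × Int)) : Prop :=
  ∀ b ∈ bricks, b.1 ≤ b.2.2.2.1 ∧ b.2.1 ≤ b.2.2.2.2.1
instance (bricks : List (Int × Int × Int × Int × Int × Int)) : Decidable (Pre_settle bricks) := by
  unfold Pre_settle; infer_instance

def pvWitness_settle : (List (Int × Int × Int × Int × Int × Int)) :=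
  [(0, 0, 5, 1, 0, 6), (1, 0, 2, 1, 2, 2)]

def Spec_settle (bricks : List (Int × Int × Int × Int × Int × Int)) (out : (List (Int × Int × Int × Int × Int × Int)) × Int) : Prop := out = settle_alt bricks
instance (bricks : List (Int × Int × Int × Int × Int × Int)) (out : (List (Int × Int × Int × Int × Int × Int)) × Int) : Decidable (Spec_settle bricks out) := by
  unfold Spec_settle
  exact @instDecidableEqProd _ _ (@List.hasDecEq _ (fun a b => by infer_instance)) _ out (settle_alt bricks)

-- ===== CLAIM (what is proved, stated in full; the proofs are below) =====
def Claim_equal_settle : Prop := ∀ (bricks : List (Int × Int × Int × Int × Int × Int)), Dom_settle bricks → Pre_settle bricks → Spec_settle bricks (settle bricks)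

-- ===== LEMMAS AND PROOFS =====

-- membership in the footprint cell list
lemma mem_pvCells (x1 x2 y1 y2 : Int) (p : Int × Int) :
    p ∈ pvCells x1 x2 y1 y2 ↔ x1 ≤ p.1 ∧ p.1 ≤ x2 ∧ y1 ≤ p.2 ∧ p.2 ≤ y2 := by
  obtain ⟨px, py⟩ := p
  simp only [pvCells, List.mem_flatMap, List.mem_map, PySem.List.mem_pyRange_one, Prod.mk.injEq]
  constructor
  · rintro ⟨x, ⟨hx1, hx2⟩, y, ⟨hy1, hy2⟩, rfl, rfl⟩; exact ⟨hx1, by omega, hy1, by omega⟩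
  · rintro ⟨h1, h2, h3, h4⟩; exact ⟨px, ⟨h1, by omega⟩, py, ⟨h3, by omega⟩, rfl, rfl⟩

-- a fold of inserts of a constant value over a key list, read back with getD
lemma getD_foldl_insert_const (l : List (Int × Int)) (v : Int) (d : Std.HashMap (Int × Int) Int)
    (p : Int × Int) :
    (l.foldl (fun d c => d.insert c v) d).getD p 0 = if p ∈ l then v else d.getD p 0 := by
  induction l generalizing d with
  | nil => simp
  | cons a l ih =>
    simp only [List.foldl_cons, ih, List.mem_cons, Std.HashMap.getD_insert, beq_iff_eq]
    by_cases hpl : p ∈ l <;> by_cases hpa : p = a <;> simp [hpl, hpa, eq_comm]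

-- appending one settled brick updates cover_height exactly on its footprint
lemma cover_height_append (settled : List (Int × Int × Int × Int × Int × Int))
    (b : Int × Int × Int × Int × Int × Int) (x y : Int) :
    cover_height (settled ++ [b]) x y =
      if b.1 ≤ x ∧ x ≤ b.2.2.2.1 ∧ b.2.1 ≤ y ∧ y ≤ b.2.2.2.2.1 then b.2.2.2.2.2
      else cover_height settled x y := by
  obtain ⟨x1, y1, z1, x2, y2, z2⟩ := b
  simp [cover_height, coverHeightRev]

-- the loop invariant: the heightmap agrees with the reverse scan of the settled list
lemma loop_eq (bs : List (Int × Int × Int × Int × Int × Int)) :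
    ∀ (mz : Std.HashMap (Int × Int) Int) (settled : List (Int × Int × Int × Int × Int × Int)) (falls : Int),
      (∀ x y : Int, mz.getD (x, y) 0 = cover_height settled x y) →
      settleLoop mz settled falls bs = settleAltLoop settled falls bs := by
  induction bs with
  | nil => intro mz settled falls _; rfl
  | cons b rest ih =>
    intro mz settled falls H
    obtain ⟨x1, y1, z1, x2, y2, z2⟩ := b
    have hmap : (pvCells x1 x2 y1 y2).map (fun c => mz.getD c 0)
        = (pvCells x1 x2 y1 y2).map (fun c => cover_height settled c.1 c.2) := by
      apply List.map_congr_left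
      intro c _; obtain ⟨cx, cy⟩ := c; exact H cx cy
    simp only [settleLoop, settleAltLoop, drop_brick, hmap]
    set support : Int :=
      (PySem.List.max? ((pvCells x1 x2 y1 y2).map (fun c => cover_height settled c.1 c.2)) (fun v => v)).getD 0 with hs
    have hfalls : (if z1 - (z1 - (support + 1)) ≠ z1 then falls + 1 else falls)
        = (if z1 - (support + 1) ≠ 0 then falls + 1 else falls) := by
      by_cases h : z1 - (support + 1) = 0
      · simp [h]
      · simp [h]; omega
    rw [hfalls]
    apply ih
    intro x y
    rw [getD_foldl_insert_const, cover_height_append]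
    simp only [mem_pvCells]
    rw [H x y]

-- ===== VERDICT (by name: the statement is the Claim_ definition above) =====
theorem settle_spec : Claim_equal_settle := by
  intro bricks _ _
  unfold Spec_settle settle settle_alt
  apply loop_eq
  intro x y
  simp [cover_height, coverHeightRev]
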